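-- pv_equiv track=rewrite | github.com/villegust/programeringsteknik | inlämningar/uppgift2.py | extended_list
-- ===== SOURCE A (Python) =====
-- def extended_list(x, n):
--     """
--     Funktion som skapar en lista där de element utanför listan är de första och sista index i listan.
--     """
--     lst = []
--     for e in x:
--         lst.append(e)
--
--     for _ in range(n):
--         lst.insert(0, x[0])
--         lst.append(x[len(x)- 1])
--
--     return lst
-- ===== SOURCE B (Python) =====
-- def extended_list(x, n):
--     if n <= 0:
--         return list(x)
--     return [x[0]] * n + list(x) + [x[-1]] * n
-- ===== Notes on version B (the rewrite author's own statement) =====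
-- stated objective: faster
-- what changed: Replaces A's element-by-element copy followed by n rounds of insert(0,..)/append(..) with one direct concatenation of replicated padding blocks around the list.
import Mathlib
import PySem

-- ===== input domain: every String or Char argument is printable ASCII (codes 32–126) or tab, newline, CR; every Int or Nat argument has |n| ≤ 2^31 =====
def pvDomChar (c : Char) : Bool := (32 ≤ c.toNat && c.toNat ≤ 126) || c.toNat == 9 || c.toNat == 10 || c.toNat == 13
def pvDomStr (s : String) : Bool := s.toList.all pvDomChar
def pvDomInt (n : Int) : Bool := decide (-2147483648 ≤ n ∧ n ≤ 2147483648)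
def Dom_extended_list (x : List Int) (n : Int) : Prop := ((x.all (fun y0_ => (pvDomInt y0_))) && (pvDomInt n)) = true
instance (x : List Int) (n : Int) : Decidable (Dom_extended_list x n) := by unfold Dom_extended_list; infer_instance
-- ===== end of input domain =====

-- B builds the result as one concatenation of replicated padding blocks instead of A's copy loop plus n insert(0,..)/append rounds (simpler decomposition).

-- ===== PORT A =====
-- lst = []; for e in x: lst.append(e); for _ in range(n): lst.insert(0, x[0]); lst.append(x[len(x)-1])
-- x[0] / x[len(x)-1] raise IndexError on empty x (pyGet? = none); those inputs are outside Pre_, so the .getD 0 value there is never claimed.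
def extended_list (x : List Int) (n : Int) : List Int :=
  let lst := x.foldl (fun acc e => acc ++ [e]) []
  (PySem.List.pyRange 0 n 1).foldl
    (fun lst _ =>
      ((PySem.List.pyGet? x 0).getD 0 :: lst) ++
        [(PySem.List.pyGet? x ((x.length : Int) - 1)).getD 0])
    lst

-- ===== PORT B =====
-- if n <= 0: return list(x); return [x[0]]*n + list(x) + [x[-1]]*n
def extended_list_alt (x : List Int) (n : Int) : List Int :=
  if n ≤ 0 then x
  else
    List.replicate n.toNat ((PySem.List.pyGet? x 0).getD 0) ++ x ++
      List.replicate n.toNat ((PySem.List.pyGet? x (-1)).getD 0)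

-- ===== PRECONDITION & SPEC =====
-- Pre_ excludes exactly the inputs where A raises IndexError (empty x with n > 0); B raises there too.
def Pre_extended_list (x : List Int) (n : Int) : Prop := x ≠ [] ∨ n ≤ 0
instance (x : List Int) (n : Int) : Decidable (Pre_extended_list x n) := by unfold Pre_extended_list; infer_instance
def pvWitness_extended_list : List Int × Int := ([1, 2, 3], 2)
def Spec_extended_list (x : List Int) (n : Int) (out : List Int) : Prop := out = extended_list_alt x n
instance (x : List Int) (n : Int) (out : List Int) : Decidable (Spec_extended_list x n out) := by unfold Spec_extended_list; infer_instance

-- ===== CLAIM (what is proved, stated in full; the proofs are below) =====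
def Claim_equal_extended_list : Prop := ∀ (x : List Int) (n : Int), Dom_extended_list x n → Pre_extended_list x n → Spec_extended_list x n (extended_list x n)

-- ===== LEMMAS AND PROOFS =====

theorem foldl_append_singleton (x : List Int) (s : List Int) :
    x.foldl (fun acc e => acc ++ [e]) s = s ++ x := by
  induction x generalizing s with
  | nil => simp
  | cons a t ih => simp [List.foldl, ih]

theorem rep_comm (k : Nat) (a : Int) (X : List Int) :
    List.replicate k a ++ a :: X = a :: (List.replicate k a ++ X) := by
  induction k with
  | zero => simp
  | succ m ih => simp [List.replicate_succ, ih]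

theorem foldl_pad (l : List Int) (a b : Int) (s : List Int) :
    l.foldl (fun lst _ => (a :: lst) ++ [b]) s =
      List.replicate l.length a ++ s ++ List.replicate l.length b := by
  induction l generalizing s with
  | nil => simp
  | cons h t ih =>
      rw [List.foldl_cons, ih, List.length_cons, List.replicate_succ, List.replicate_succ]
      simp only [List.cons_append, List.append_assoc]
      rw [rep_comm]
      simp

theorem pyGet?_neg_one_eq (x : List Int) (hx : x ≠ []) :
    PySem.List.pyGet? x (-1) = PySem.List.pyGet? x ((x.length : Int) - 1) := by
  have hl : 0 < x.length := List.length_pos_iff.mpr hx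
  rw [PySem.List.pyGet?_neg_one,
    show PySem.List.pyGet? x ((x.length : Int) - 1) = x[((x.length : Int) - 1).toNat]? from
      PySem.List.pyGet?_of_nonneg x (by omega)]
  have h : ((x.length : Int) - 1).toNat = x.length - 1 := by omega
  rw [h, ← List.getLast?_eq_getElem?]

-- ===== VERDICT (by name: the statement is the Claim_ definition above) =====
theorem extended_list_spec : Claim_equal_extended_list := by
  intro x n _ hpre
  unfold Spec_extended_list extended_list extended_list_alt
  simp only [foldl_append_singleton, List.nil_append]
  rw [foldl_pad, PySem.List.length_pyRange_one]
  by_cases hn : n ≤ 0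
  · have h0 : n.toNat = 0 := by omega
    simp [hn, h0]
  · rcases hpre with hx | hx
    · rw [pyGet?_neg_one_eq x hx]
      simp [hn]
    · omega
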